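-- pv_equiv track=rewrite | github.com/JohnSunny21/python-daily-coding | FreeCodeCamp/CodingQ/2026WinterGames/Day07SpeedSkating.py | largest_difference
-- ===== SOURCE A (Python) =====
-- def largest_difference(skater1, skater2):
--
--     max_diff = 0
--     final_index = 0
--     for index, (lap1, lap2) in enumerate(zip(skater1, skater2), start=1):
--         diff = abs(lap1 - lap2)
--         if max_diff < diff:
--             max_diff = diff
--             final_index = index
--     return final_index
-- ===== SOURCE B (Python) =====
-- def largest_difference(skater1, skater2):
--     diffs = [abs(l1 - l2) for l1, l2 in zip(skater1, skater2)]
--     m = max(diffs, default=0)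
--     return diffs.index(m) + 1 if m > 0 else 0
-- ===== Notes on version B (the rewrite author's own statement) =====
-- stated objective: simpler
-- what changed: Replaces the single accumulating max/index loop with build-the-diff-table, then max(..., default=0), then diffs.index(m) to locate the first maximum, guarded by m>0.
import Mathlib
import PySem

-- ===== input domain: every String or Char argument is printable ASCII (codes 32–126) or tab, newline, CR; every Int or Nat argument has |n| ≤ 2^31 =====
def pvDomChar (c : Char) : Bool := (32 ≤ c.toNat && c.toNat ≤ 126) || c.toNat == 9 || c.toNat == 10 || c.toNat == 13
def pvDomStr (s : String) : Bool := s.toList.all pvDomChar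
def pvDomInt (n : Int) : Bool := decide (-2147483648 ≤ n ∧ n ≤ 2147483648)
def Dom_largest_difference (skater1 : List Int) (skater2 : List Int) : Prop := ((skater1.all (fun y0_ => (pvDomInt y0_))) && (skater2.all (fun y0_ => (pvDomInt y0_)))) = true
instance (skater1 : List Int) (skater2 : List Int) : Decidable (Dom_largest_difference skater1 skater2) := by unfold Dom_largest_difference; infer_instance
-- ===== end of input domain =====

-- B replaces A's single accumulating max/index loop with: build the diff table, take max(default 0), locate its first index; objective: simpler.
-- ===== PORT A =====
def pvStepA (acc : Int × Int) (p : Int × (Int × Int)) : Int × Int :=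
  let diff := |p.2.1 - p.2.2|
  if acc.1 < diff then (diff, p.1) else acc

def largest_difference (skater1 : List Int) (skater2 : List Int) : Int :=
  ((PySem.List.enumerate (skater1.zip skater2) 1).foldl pvStepA (0, 0)).2

-- ===== PORT B =====
def largest_difference_alt (skater1 : List Int) (skater2 : List Int) : Int :=
  let diffs := (skater1.zip skater2).map (fun p => |p.1 - p.2|)
  let m := (PySem.List.max? diffs (fun y => y)).getD 0
  if m > 0 then ((PySem.List.index? diffs m).getD 0 : Int) + 1 else 0

-- ===== PRECONDITION & SPEC =====
def Spec_largest_difference (skater1 : List Int) (skater2 : List Int) (out : Int) : Prop := out = largest_difference_alt skater1 skater2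
instance (skater1 : List Int) (skater2 : List Int) (out : Int) : Decidable (Spec_largest_difference skater1 skater2 out) := by unfold Spec_largest_difference; infer_instance

-- ===== CLAIM (what is proved, stated in full; the proofs are below) =====
def Claim_equal_largest_difference : Prop := ∀ (skater1 : List Int) (skater2 : List Int), Dom_largest_difference skater1 skater2 → Spec_largest_difference skater1 skater2 (largest_difference skater1 skater2)

-- ===== LEMMAS AND PROOFS =====

lemma foldl_max_eq_or_mem (l : List Int) (a : Int) :
    l.foldl max a = a ∨ l.foldl max a ∈ l := by
  induction l generalizing a with
  | nil => exact Or.inl rfl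
  | cons x t ih =>
    simp only [List.foldl_cons]
    rcases ih (max a x) with h | h
    · rcases max_cases a x with ⟨he, _⟩ | ⟨he, _⟩
      · exact Or.inl (h.trans he)
      · exact Or.inr (by rw [h, he]; exact List.mem_cons_self)
    · exact Or.inr (List.mem_cons_of_mem _ h)

-- invariant of A's loop: the fold computes the running max and the 1-based index of its first strict improvement
lemma loopA_char (l : List (Int × Int)) :
    ∀ (i m fi : Int),
      (PySem.List.enumerate l i).foldl pvStepA (m, fi) =
        ((l.map (fun p => |p.1 - p.2|)).foldl max m,
         if m < (l.map (fun p => |p.1 - p.2|)).foldl max m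
         then i + ((PySem.List.index? (l.map (fun p => |p.1 - p.2|)) ((l.map (fun p => |p.1 - p.2|)).foldl max m)).getD 0 : Int)
         else fi) := by
  induction l with
  | nil => intro i m fi; simp [PySem.List.enumerate]
  | cons p t ih =>
    intro i m fi
    rw [PySem.List.enumerate_cons, List.foldl_cons]
    simp only [List.map_cons, List.foldl_cons]
    by_cases h : m < |p.1 - p.2|
    · have hstep : pvStepA (m, fi) (i, p) = (|p.1 - p.2|, i) := by
        simp only [pvStepA, if_pos h]
      rw [hstep, ih (i + 1) |p.1 - p.2| i, max_eq_right h.le]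
      have hdM : |p.1 - p.2| ≤ (t.map (fun p => |p.1 - p.2|)).foldl max |p.1 - p.2| :=
        (PySem.List.le_foldl_max _ _).1
      have hmM : m < (t.map (fun p => |p.1 - p.2|)).foldl max |p.1 - p.2| := lt_of_lt_of_le h hdM
      rw [if_pos hmM]
      by_cases h2 : |p.1 - p.2| < (t.map (fun p => |p.1 - p.2|)).foldl max |p.1 - p.2|
      · have hne : |p.1 - p.2| ≠ (t.map (fun p => |p.1 - p.2|)).foldl max |p.1 - p.2| := ne_of_lt h2
        have hmem : (t.map (fun p => |p.1 - p.2|)).foldl max |p.1 - p.2| ∈ t.map (fun p => |p.1 - p.2|) := by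
          rcases foldl_max_eq_or_mem (t.map (fun p => |p.1 - p.2|)) |p.1 - p.2| with he | he
          · exact absurd he.symm hne
          · exact he
        obtain ⟨k, hk⟩ := Option.isSome_iff_exists.1 ((PySem.List.index?_isSome_iff _ _).2 hmem)
        rw [if_pos h2, PySem.List.index?_cons_of_ne _ hne, hk]
        simp only [Option.map_some, Option.getD_some, Prod.mk.injEq, true_and]
        push_cast; ring
      · have hdM' : (t.map (fun p => |p.1 - p.2|)).foldl max |p.1 - p.2| = |p.1 - p.2| :=
          le_antisymm (not_lt.1 h2) hdM
        rw [if_neg h2, hdM', PySem.List.index?_cons_self]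
        simp
    · have hstep : pvStepA (m, fi) (i, p) = (m, fi) := by
        simp only [pvStepA, if_neg h]
      rw [hstep, ih (i + 1) m fi, max_eq_left (not_lt.1 h)]
      by_cases h2 : m < (t.map (fun p => |p.1 - p.2|)).foldl max m
      · have hne : |p.1 - p.2| ≠ (t.map (fun p => |p.1 - p.2|)).foldl max m :=
          ne_of_lt (lt_of_le_of_lt (not_lt.1 h) h2)
        have hmem : (t.map (fun p => |p.1 - p.2|)).foldl max m ∈ t.map (fun p => |p.1 - p.2|) := by
          rcases foldl_max_eq_or_mem (t.map (fun p => |p.1 - p.2|)) m with he | he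
          · exact absurd he (ne_of_lt h2).symm
          · exact he
        obtain ⟨k, hk⟩ := Option.isSome_iff_exists.1 ((PySem.List.index?_isSome_iff _ _).2 hmem)
        rw [if_pos h2, if_pos h2, PySem.List.index?_cons_of_ne _ hne, hk]
        simp only [Option.map_some, Option.getD_some, Prod.mk.injEq, true_and]
        push_cast; ring
      · rw [if_neg h2, if_neg h2]

-- ===== VERDICT (by name: the statement is the Claim_ definition above) =====
theorem largest_difference_spec : Claim_equal_largest_difference := by
  intro s1 s2 _
  unfold Spec_largest_difference largest_difference largest_difference_alt
  rw [loopA_char]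
  simp only
  cases hcase : (s1.zip s2).map (fun p => |p.1 - p.2|) with
  | nil => simp [PySem.List.max?]
  | cons x t =>
    have hx : (0:Int) ≤ x := by
      have hmem : x ∈ (s1.zip s2).map (fun p => |p.1 - p.2|) := by
        rw [hcase]; exact List.mem_cons_self
      obtain ⟨q, _, hq⟩ := List.mem_map.1 hmem
      rw [← hq]; exact abs_nonneg _
    rw [List.foldl_cons, max_eq_right hx, PySem.List.max?_id_cons]
    simp only [Option.getD_some, gt_iff_lt]
    split_ifs with hpos
    · ring
    · rfl
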